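-- pv_equiv track=rewrite | github.com/fabianlsz/python | lab2/lab2.py | count_simetrice
-- ===== SOURCE A (Python) =====
-- def count_simetrice(numere2):
--     """Returneaza numarul de perechi simetrice
--
--     Parameters
--     ----------
--     list : numere2
--         Lista cu numere
--
--     Returns
--     -------
--     cnt
--         Numarul de perechi
--
--     """
--     cnt = 0
--     accesat = set()
--     for num in numere2:
--         zeci = num // 10
--         unitati = num % 10
--         invers = unitati * 10 + zeci
--         if invers in accesat:
--             cnt += 1
--         accesat.add(num)
--     return cnt
-- ===== SOURCE B (Python) =====
-- def count_simetrice(numere2):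
--     first_occ = {}
--     for i, x in enumerate(numere2):
--         if x not in first_occ:
--             first_occ[x] = i
--     cnt = 0
--     for j, x in enumerate(numere2):
--         invers = (x % 10) * 10 + x // 10
--         if invers in first_occ and first_occ[invers] < j:
--             cnt += 1
--     return cnt
-- ===== Notes on version B (the rewrite author's own statement) =====
-- stated objective: alternative
-- what changed: Replaces the single pass with a growing seen-set by two passes: one building a first-occurrence index table, one counting elements whose reversal first occurs strictly earlier.
import Mathlib
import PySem

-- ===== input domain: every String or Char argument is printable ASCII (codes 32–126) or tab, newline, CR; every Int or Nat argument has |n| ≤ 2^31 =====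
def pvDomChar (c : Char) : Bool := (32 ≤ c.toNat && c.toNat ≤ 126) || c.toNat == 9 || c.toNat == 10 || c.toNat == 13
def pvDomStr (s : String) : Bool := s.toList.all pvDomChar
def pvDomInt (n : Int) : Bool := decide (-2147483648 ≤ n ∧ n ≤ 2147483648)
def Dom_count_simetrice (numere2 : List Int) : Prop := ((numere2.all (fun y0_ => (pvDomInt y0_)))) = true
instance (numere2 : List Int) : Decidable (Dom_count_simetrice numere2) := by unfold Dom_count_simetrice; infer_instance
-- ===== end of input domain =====

-- B replaces A's single pass with a growing seen-set by two passes: a first-occurrence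
-- index table built once, then a count of elements whose reversal first occurs strictly
-- earlier (objective: alternative decomposition, same O(n) cost).

-- ===== PORT A =====
def count_simetrice (numere2 : List Int) : Int :=
  (numere2.foldl
    (fun (st : Int × PySem.Set Int) num =>
      let zeci := PySem.Int.floordiv num 10
      let unitati := PySem.Int.mod num 10
      let invers := unitati * 10 + zeci
      ((if PySem.Set.contains st.2 invers then st.1 + 1 else st.1), PySem.Set.add st.2 num))
    (0, PySem.Set.empty)).1

-- ===== PORT B =====
def count_simetrice_alt (numere2 : List Int) : Int :=
  let first_occ : PySem.Dict Int Int :=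
    (PySem.List.enumerate numere2).foldl
      (fun d p => if d.contains p.2 then d else d.insert p.2 p.1) PySem.Dict.empty
  (PySem.List.enumerate numere2).foldl
    (fun cnt p =>
      let invers := PySem.Int.mod p.2 10 * 10 + PySem.Int.floordiv p.2 10
      if first_occ.contains invers && decide (first_occ.getD invers 0 < p.1) then cnt + 1
      else cnt) 0

-- ===== PRECONDITION & SPEC =====
def Spec_count_simetrice (numere2 : List Int) (out : Int) : Prop := out = count_simetrice_alt numere2
instance (numere2 : List Int) (out : Int) : Decidable (Spec_count_simetrice numere2 out) := by unfold Spec_count_simetrice; infer_instance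

-- ===== CLAIM (what is proved, stated in full; the proofs are below) =====
def Claim_equal_count_simetrice : Prop := ∀ (numere2 : List Int), Dom_count_simetrice numere2 → Spec_count_simetrice numere2 (count_simetrice numere2)

-- ===== LEMMAS AND PROOFS =====

-- abbreviation (proof-side only) for the dict B's first pass builds
def pvBuildD (numere2 : List Int) : PySem.Dict Int Int :=
  (PySem.List.enumerate numere2).foldl
    (fun d p => if d.contains p.2 then d else d.insert p.2 p.1) PySem.Dict.empty

-- The dict built by B's first pass: get? is the first-occurrence index (offset by the
-- enumeration start), with entries of the initial dict taking precedence.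
theorem get?_buildDict (xs : List Int) (s : Int) (d : PySem.Dict Int Int) (v : Int) :
    ((PySem.List.enumerate xs s).foldl
        (fun d p => if d.contains p.2 then d else d.insert p.2 p.1) d).get? v
      = (d.get? v).or ((PySem.List.index? xs v).map (fun k => s + (k : Int))) := by
  induction xs generalizing s d with
  | nil => simp [PySem.List.enumerate]
  | cons x xs ih =>
    simp only [PySem.List.enumerate_cons, List.foldl_cons]
    rw [ih]
    by_cases hxv : x = v
    · subst hxv
      rw [PySem.List.index?_cons_self]
      by_cases hc : d.contains x = true
      · rw [if_pos hc]
        have hsome : (d.get? x).isSome := by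
          rw [← PySem.Dict.contains_eq_isSome_get?]; exact hc
        cases hg : d.get? x with
        | none => rw [hg] at hsome; simp at hsome
        | some w => simp
      · rw [if_neg hc]
        have hg : d.get? x = none := by
          cases hg : d.get? x with
          | none => rfl
          | some w => exact absurd (by rw [PySem.Dict.contains_eq_isSome_get?, hg]; rfl) hc
        rw [PySem.Dict.get?_insert_self, hg]
        simp
    · rw [PySem.List.index?_cons_of_ne xs hxv]
      have hgd : (if d.contains x = true then d else d.insert x s).get? v = d.get? v := by
        by_cases hc : d.contains x = true
        · rw [if_pos hc]
        · rw [if_neg hc]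
          exact PySem.Dict.get?_insert_of_ne d s (fun h => hxv h.symm)
      rw [hgd]
      cases hidx : PySem.List.index? xs v with
      | none => simp
      | some k =>
        cases hdv : d.get? v with
        | some w => simp
        | none =>
          simp
          ring

-- membership in a prefix ↔ the first occurrence is strictly earlier
theorem mem_take_iff_index_lt (xs : List Int) (v : Int) (j : Nat) :
    v ∈ xs.take j ↔ ∃ k, PySem.List.index? xs v = some k ∧ k < j := by
  induction xs generalizing j with
  | nil => simp [PySem.List.index?]
  | cons x xs ih =>
    cases j with
    | zero => simp
    | succ j =>
      by_cases hxv : x = v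
      · subst hxv
        rw [PySem.List.index?_cons_self]
        simp
      · rw [PySem.List.index?_cons_of_ne xs hxv]
        simp only [List.take_succ_cons, List.mem_cons]
        constructor
        · rintro (h | h)
          · exact absurd h.symm hxv
          · obtain ⟨k, hk, hlt⟩ := (ih j).1 h
            exact ⟨k + 1, by rw [hk]; rfl, by omega⟩
        · rintro ⟨k, hk, hlt⟩
          cases hidx : PySem.List.index? xs v with
          | none => rw [hidx] at hk; simp at hk
          | some k' =>
            rw [hidx] at hk; simp at hk
            right
            exact (ih j).2 ⟨k', hidx, by omega⟩

-- B's second-pass condition at index j is membership of the reversal in the j-prefix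
theorem cond_iff (numere2 : List Int) (v : Int) (j : Nat) :
    ((pvBuildD numere2).contains v
      && decide ((pvBuildD numere2).getD v 0 < (j : Int))) = true
      ↔ v ∈ numere2.take j := by
  have hget : (pvBuildD numere2).get? v
      = (PySem.List.index? numere2 v).map (fun k => (k : Int)) := by
    unfold pvBuildD
    rw [get?_buildDict, PySem.Dict.get?_empty, Option.none_or]
    congr 1
    funext k
    simp
  have hgetD : (pvBuildD numere2).getD v 0 = ((pvBuildD numere2).get? v).getD 0 := rfl
  rw [PySem.Dict.contains_eq_isSome_get?, hgetD, hget, mem_take_iff_index_lt]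
  cases hidx : PySem.List.index? numere2 v with
  | none => simp
  | some k =>
    simp

-- the two loops agree, prefix by prefix
theorem main_loop (numere2 : List Int) :
    ∀ (rest pre : List Int) (cnt : Int), numere2 = pre ++ rest →
    (rest.foldl
      (fun (st : Int × PySem.Set Int) num =>
        let zeci := PySem.Int.floordiv num 10
        let unitati := PySem.Int.mod num 10
        let invers := unitati * 10 + zeci
        ((if PySem.Set.contains st.2 invers then st.1 + 1 else st.1), PySem.Set.add st.2 num))
      (cnt, PySem.Set.ofList pre)).1
    = (PySem.List.enumerate rest (pre.length : Int)).foldl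
        (fun cnt p =>
          let invers := PySem.Int.mod p.2 10 * 10 + PySem.Int.floordiv p.2 10
          if (pvBuildD numere2).contains invers
              && decide ((pvBuildD numere2).getD invers 0 < p.1) then cnt + 1
          else cnt) cnt := by
  intro rest
  induction rest with
  | nil => intro pre cnt h; simp [PySem.List.enumerate]
  | cons x xs ih =>
    intro pre cnt h
    simp only [PySem.List.enumerate_cons, List.foldl_cons]
    have hpre : numere2.take pre.length = pre := by rw [h]; exact List.take_left
    have hcond :
        ((pvBuildD numere2).contains (PySem.Int.mod x 10 * 10 + PySem.Int.floordiv x 10)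
          && decide ((pvBuildD numere2).getD
              (PySem.Int.mod x 10 * 10 + PySem.Int.floordiv x 10) 0 < (pre.length : Int))) = true
        ↔ PySem.Set.contains (PySem.Set.ofList pre)
            (PySem.Int.mod x 10 * 10 + PySem.Int.floordiv x 10) = true := by
      rw [cond_iff numere2 _ pre.length, hpre, PySem.Set.contains_iff, PySem.Set.mem_ofList]
    have hadd : PySem.Set.add (PySem.Set.ofList pre) x = PySem.Set.ofList (pre ++ [x]) := by
      simp [PySem.Set.ofList_eq_foldl, List.foldl_append]
    have hlen : ((pre ++ [x]).length : Int) = (pre.length : Int) + 1 := by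
      simp
    have hrec := ih (pre ++ [x])
      (if PySem.Set.contains (PySem.Set.ofList pre)
          (PySem.Int.mod x 10 * 10 + PySem.Int.floordiv x 10) then cnt + 1 else cnt)
      (by rw [h, List.append_assoc]; rfl)
    rw [hlen] at hrec
    simp only at hrec ⊢
    rw [hadd, hrec]
    congr 1
    by_cases hc : PySem.Set.contains (PySem.Set.ofList pre)
        (PySem.Int.mod x 10 * 10 + PySem.Int.floordiv x 10) = true
    · rw [if_pos hc, if_pos (hcond.2 hc)]
    · rw [if_neg hc, if_neg (fun hh => hc (hcond.1 hh))]

-- ===== VERDICT (by name: the statement is the Claim_ definition above) =====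
theorem count_simetrice_spec : Claim_equal_count_simetrice := by
  intro numere2 _
  unfold Spec_count_simetrice count_simetrice count_simetrice_alt
  have := main_loop numere2 numere2 [] 0 rfl
  simpa [pvBuildD, PySem.Set.ofList] using this
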